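-- pv_equiv track=rewrite | github.com/younader/LiteraryMetaphorDetection | src/preprocess.py | trim_text
-- ===== SOURCE A (Python) =====
-- def trim_text(t):
--   """
--       finds the beginning and ending of a number in the original string and slices out the number
--       Args:
--         t: (string) token to be processed
--   """
--
--   if len(t)<1:
--     return t
--   start_index=0
--   end_index=len(t)-1
--   while not t[start_index].isnumeric() and start_index<len(t):
--     start_index+=1
--   while not t[end_index].isnumeric()and end_index>-1:
--     end_index-=1
--   return t[start_index:end_index+1].replace(",",'.')
-- ===== SOURCE B (Python) =====
-- def trim_text(t):
--   """
--       finds the beginning and ending of a number in the original string and slices out the number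
--   """
--   if len(t) < 1:
--     return t
--   positions = [i for i, c in enumerate(t) if c.isnumeric()]
--   start = positions[0]
--   end = positions[-1]
--   return t[start:end + 1].replace(",", ".")
-- ===== Notes on version B (the rewrite author's own statement) =====
-- stated objective: simpler
-- what changed: Replaces A's two index-walking while loops with a single enumerate pass collecting all numeric positions, then takes the first and last of that list.
-- outside the precondition, e.g. on trim_text('abc'): A raises IndexError, B raises IndexError
import Mathlib
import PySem

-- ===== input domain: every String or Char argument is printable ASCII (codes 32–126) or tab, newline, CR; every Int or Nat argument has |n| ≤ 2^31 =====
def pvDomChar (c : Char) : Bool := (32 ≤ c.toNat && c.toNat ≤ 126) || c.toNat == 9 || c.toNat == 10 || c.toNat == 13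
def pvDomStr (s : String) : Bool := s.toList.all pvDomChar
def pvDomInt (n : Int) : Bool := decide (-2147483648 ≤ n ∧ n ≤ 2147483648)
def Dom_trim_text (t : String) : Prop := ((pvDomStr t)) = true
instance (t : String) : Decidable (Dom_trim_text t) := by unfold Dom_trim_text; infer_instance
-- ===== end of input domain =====

-- B replaces A's two index-walking while loops by one enumerate pass that collects
-- all numeric positions and takes the first and last; return values proved equal on Pre_.

-- shared char classifier: both Pythons call c.isnumeric(); on Dom_trim_text's charset
-- (printable ASCII plus tab/newline/CR — the only inputs any theorem here is about)
-- Python's isnumeric holds exactly on '0'..'9', i.e. it coincides with isdigit, which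
-- is what PySem provides; outside that ASCII domain nothing is claimed.
def pvIsNum (c : Char) : Bool := PySem.Chars.isdigit c

-- ===== PORT A =====
-- the first while loop: scan forward from index i while the char is not numeric
-- (the [] case is where Python raises IndexError; outside Pre_)
def pvStartLoop : List Char → Nat → Nat
  | [], i => i
  | c :: cs, i => if pvIsNum c then i else pvStartLoop cs (i + 1)

-- the second while loop: decrement e while t[e] not numeric and e > -1 (fuel-bounded;
-- fuel suffices on every input where the loop terminates in Python)
def pvEndLoop (l : List Char) : Nat → Int → Int
  | 0, e => e
  | f + 1, e =>
    match PySem.List.pyGet? l e with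
    | none => e
    | some c => if pvIsNum c then e else if e > -1 then pvEndLoop l f (e - 1) else e

def trim_text (t : String) : String :=
  let l := t.toList
  if l.length < 1 then t
  else
    let start := pvStartLoop l 0
    let stop := pvEndLoop l (l.length + 1) ((l.length : Int) - 1)
    String.ofList (PySem.Chars.replace (PySem.List.slice l (some (start : Int)) (some (stop + 1))) [','] ['.'])

-- ===== PORT B =====
-- one pass: the list of all indices holding a numeric char
def pvPositions (l : List Char) (s : Int) : List Int :=
  ((PySem.List.enumerate l s).filter (fun p => pvIsNum p.2)).map (·.1)

def trim_text_alt (t : String) : String :=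
  let l := t.toList
  if l.length < 1 then t
  else
    let positions := pvPositions l 0
    let start := (PySem.List.pyGet? positions 0).getD 0      -- positions[0]; none = IndexError, outside Pre_
    let stop := (PySem.List.pyGet? positions (-1)).getD 0    -- positions[-1]
    String.ofList (PySem.Chars.replace (PySem.List.slice l (some start) (some (stop + 1))) [','] ['.'])

-- ===== PRECONDITION & SPEC =====
-- Pre_ excludes exactly the inputs (within Dom_trim_text, whose ASCII charset makes
-- isnumeric = isdigit) on which Python A raises IndexError: a non-empty string with no
-- numeric character. B raises IndexError on exactly the same inputs.
def Pre_trim_text (t : String) : Prop := (t.toList.isEmpty || t.toList.any pvIsNum) = true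
instance (t : String) : Decidable (Pre_trim_text t) := by unfold Pre_trim_text; infer_instance
def pvWitness_trim_text : String := "a1,2b"

def Spec_trim_text (t : String) (out : String) : Prop := out = trim_text_alt t
instance (t : String) (out : String) : Decidable (Spec_trim_text t out) := by unfold Spec_trim_text; infer_instance

-- ===== CLAIM (what is proved, stated in full; the proofs are below) =====
def Claim_equal_trim_text : Prop := ∀ (t : String), Dom_trim_text t → Pre_trim_text t → Spec_trim_text t (trim_text t)

-- ===== LEMMAS AND PROOFS =====

theorem pvPositions_cons (c : Char) (cs : List Char) (s : Int) :
    pvPositions (c :: cs) s =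
      if pvIsNum c then s :: pvPositions cs (s + 1) else pvPositions cs (s + 1) := by
  simp [pvPositions, PySem.List.enumerate_cons, List.filter]
  split <;> simp_all

theorem pvPositions_mem (l : List Char) (s x : Int) :
    x ∈ pvPositions l s ↔ ∃ (k : Nat), k < l.length ∧ x = s + k ∧ pvIsNum (l.getD k ' ') = true := by
  simp only [pvPositions, List.mem_map, List.mem_filter]
  constructor
  · rintro ⟨p, ⟨hp, hnum⟩, rfl⟩
    rcases (PySem.List.mem_enumerate_iff l s p).1 hp with ⟨k, hk, rfl⟩
    exact ⟨k, hk, rfl, by rwa [List.getD_eq_getElem _ _ hk]⟩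
  · rintro ⟨k, hk, rfl, hnum⟩
    refine ⟨(s + k, l[k]), ⟨(PySem.List.mem_enumerate_iff l s _).2 ⟨k, hk, rfl⟩, ?_⟩, rfl⟩
    rwa [List.getD_eq_getElem _ _ hk] at hnum

theorem pvPositions_pairwise (l : List Char) (s : Int) :
    (pvPositions l s).Pairwise (· < ·) := by
  have h := PySem.List.pairwise_lt_enumerate l s
  exact List.Pairwise.map _ (fun _ _ h => h) (h.sublist List.filter_sublist)

theorem pvPositions_ne_nil (l : List Char) (s : Int) (h : l.any pvIsNum = true) :
    pvPositions l s ≠ [] := by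
  rcases List.any_eq_true.1 h with ⟨c, hc, hnum⟩
  rcases List.getElem_of_mem hc with ⟨k, hk, rfl⟩
  intro hnil
  have : (s + k : Int) ∈ pvPositions l s :=
    (pvPositions_mem l s _).2 ⟨k, hk, rfl, by rwa [List.getD_eq_getElem _ _ hk]⟩
  simp [hnil] at this

-- the last element of a strictly increasing list bounds every member
theorem pairwise_le_getLast {P : List Int} (hp : P.Pairwise (· < ·)) {x : Int}
    (hx : x ∈ P) (hne : P ≠ []) : x ≤ P.getLast hne := by
  induction P with
  | nil => cases hx
  | cons a rest ih =>
    cases rest with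
    | nil => simp at hx; simp [hx]
    | cons b r =>
      rw [List.getLast_cons (by simp)]
      rcases List.mem_cons.1 hx with rfl | hx'
      · have := (List.pairwise_cons.1 hp).1 _ (List.getLast_mem (l := b :: r) (by simp))
        omega
      · exact ih (List.pairwise_cons.1 hp).2 hx' (by simp)

-- A's forward scan returns i plus the offset of the first numeric char = head of positions
theorem startLoop_eq (l : List Char) (i : Nat) (h : l.any pvIsNum = true) :
    (pvStartLoop l i : Int) = (pvPositions l (i : Int)).headD 0 := by
  induction l generalizing i with
  | nil => simp at h
  | cons c cs ih =>
    rw [pvPositions_cons]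
    by_cases hc : pvIsNum c = true
    · simp [pvStartLoop, hc]
    · have hcs : cs.any pvIsNum = true := by
        simp [List.any_cons, hc] at h; exact List.any_eq_true.2 h
      have hih := ih (i + 1) hcs
      simp only [pvStartLoop, hc, Bool.false_eq_true, if_false]
      rw [hih]; norm_num

-- A's backward scan from any e between the last numeric index and the end returns that index
theorem endLoop_eq (l : List Char) (m : Int)
    (hm0 : 0 ≤ m) (hmlen : m < (l.length : Int))
    (hnum : pvIsNum (l.getD m.toNat ' ') = true)
    (hmax : ∀ e : Int, m < e → e < (l.length : Int) → pvIsNum (l.getD e.toNat ' ') = false) :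
    ∀ (fuel : Nat) (e : Int), m ≤ e → e < (l.length : Int) → (e - m).toNat < fuel →
      pvEndLoop l fuel e = m := by
  intro fuel
  induction fuel with
  | zero => omega
  | succ f ih =>
    intro e hme helen hfuel
    have hlt : e.toNat < l.length := by omega
    have hget : PySem.List.pyGet? l e = some (l.getD e.toNat ' ') := by
      have h1 : PySem.List.pyGet? l e = l[e.toNat]? := by
        conv_lhs => rw [show e = ((e.toNat : Nat) : Int) by omega]
        exact PySem.List.pyGet?_natCast l e.toNat
      rw [h1, List.getElem?_eq_getElem hlt, List.getD_eq_getElem _ _ hlt]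
    rw [pvEndLoop, hget]
    show (if pvIsNum (l.getD e.toNat ' ') = true then e
          else if e > -1 then pvEndLoop l f (e - 1) else e) = m
    by_cases heq : e = m
    · subst heq; rw [if_pos hnum]
    · have hfalse : pvIsNum (l.getD e.toNat ' ') = false := hmax e (by omega) helen
      rw [if_neg (by rw [hfalse]; simp), if_pos (show e > -1 by omega)]
      exact ih (e - 1) (by omega) (by omega) (by omega)

theorem trim_text_spec_aux (t : String) (h : Pre_trim_text t) :
    trim_text t = trim_text_alt t := by
  unfold Pre_trim_text at h
  by_cases hnil : t.toList = []
  · simp [trim_text, trim_text_alt, hnil]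
  · have hlen : ¬ t.toList.length < 1 := by
      simpa [Nat.lt_one_iff, List.length_eq_zero_iff] using hnil
    have hany : t.toList.any pvIsNum = true := by
      simpa [List.isEmpty_iff, hnil] using h
    set l := t.toList with hl
    have hPne : pvPositions l 0 ≠ [] := pvPositions_ne_nil l 0 hany
    have hPsorted := pvPositions_pairwise l 0
    set P := pvPositions l 0 with hP
    set m := P.getLast hPne with hm
    have hmmem : m ∈ P := List.getLast_mem hPne
    obtain ⟨k, hk, hmk, hknum⟩ := (pvPositions_mem l 0 m).1 hmmem
    have hm0 : 0 ≤ m := by omega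
    have hmlen : m < (l.length : Int) := by omega
    have hmnum : pvIsNum (l.getD m.toNat ' ') = true := by
      have hek : m.toNat = k := by omega
      rwa [hek]
    have hmax : ∀ e : Int, m < e → e < (l.length : Int) → pvIsNum (l.getD e.toNat ' ') = false := by
      intro e hme helen
      by_contra hcon
      have hmem : e ∈ P := by
        refine (pvPositions_mem l 0 e).2 ⟨e.toNat, by omega, by omega, ?_⟩
        simpa using hcon
      have := pairwise_le_getLast hPsorted hmem hPne
      omega
    have hstart : ((pvStartLoop l 0 : Nat) : Int) = (PySem.List.pyGet? P 0).getD 0 := by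
      have h0 := startLoop_eq l 0 hany
      norm_num at h0
      rw [← hP] at h0
      have hg : PySem.List.pyGet? P 0 = P.head? := by
        have := PySem.List.pyGet?_natCast P 0
        norm_num at this
        rw [this, ← List.head?_eq_getElem?]
      rw [hg]
      cases hcP : P with
      | nil => exact absurd hcP hPne
      | cons a r => rw [hcP] at h0; simpa using h0
    have hstop : pvEndLoop l (l.length + 1) ((l.length : Int) - 1) = (PySem.List.pyGet? P (-1)).getD 0 := by
      rw [PySem.List.pyGet?_neg_one, List.getLast?_eq_some_getLast hPne, Option.getD_some]
      exact endLoop_eq l m hm0 hmlen hmnum hmax (l.length + 1) _ (by omega) (by omega) (by omega)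
    simp only [trim_text, trim_text_alt, ← hl, ← hP]
    rw [if_neg hlen, if_neg hlen, hstart, hstop]

-- ===== VERDICT (by name: the statement is the Claim_ definition above) =====
theorem trim_text_spec : Claim_equal_trim_text := by
  intro t _ hpre
  exact trim_text_spec_aux t hpre
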